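-- pv_equiv track=rewrite | github.com/alvynabranches/jayatu_assignment | src/dataset.py | make_corrupt_word
-- ===== SOURCE A (Python) =====
-- def make_corrupt_word(word):
--     corrupt_word = ""
--     for n, char in enumerate(word):
--         if n % 2 == 1:
--             corrupt_word += "#"
--         else:
--             corrupt_word += char
--     return corrupt_word
-- ===== SOURCE B (Python) =====
-- def make_corrupt_word(word):
--     chars = list(word)
--     chars[1::2] = "#" * (len(word) // 2)
--     return "".join(chars)
-- ===== Notes on version B (the rewrite author's own statement) =====
-- stated objective: simpler
-- what changed: The per-character enumerate loop with an if/else branch and repeated string concatenation is replaced by one bulk strided slice assignment on a character buffer, joined once at the end.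
import Mathlib
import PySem

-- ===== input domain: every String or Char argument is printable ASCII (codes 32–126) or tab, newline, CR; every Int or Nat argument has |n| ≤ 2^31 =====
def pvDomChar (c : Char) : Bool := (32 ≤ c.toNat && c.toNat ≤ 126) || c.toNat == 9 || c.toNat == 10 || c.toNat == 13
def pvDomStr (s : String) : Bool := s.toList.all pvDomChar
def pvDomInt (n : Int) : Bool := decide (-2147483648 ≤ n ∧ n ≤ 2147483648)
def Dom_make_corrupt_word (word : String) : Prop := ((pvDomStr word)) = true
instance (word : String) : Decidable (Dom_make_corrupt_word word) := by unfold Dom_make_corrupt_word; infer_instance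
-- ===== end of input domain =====

-- B replaces the per-character if/else loop by one strided slice write chars[1::2]; objective: simpler.


-- ===== PORT A =====
-- for n, char in enumerate(word): corrupt_word += "#" if n odd else char
def make_corrupt_word (word : String) : String :=
  String.mk ((PySem.List.enumerate word.toList 0).foldl
    (fun acc p => acc ++ [if p.1 % 2 == 1 then '#' else p.2]) [])

-- ===== PORT B =====
-- chars[1::2] = '#' * (len(word)//2): write '#' at every odd position, two cells at a time
def pvWriteOdd : List Char → List Char
  | a :: _ :: rest => a :: '#' :: pvWriteOdd rest
  | xs => xs

def make_corrupt_word_alt (word : String) : String :=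
  String.mk (pvWriteOdd word.toList)

-- ===== PRECONDITION & SPEC =====
def Spec_make_corrupt_word (word : String) (out : String) : Prop := out = make_corrupt_word_alt word
instance (word : String) (out : String) : Decidable (Spec_make_corrupt_word word out) := by unfold Spec_make_corrupt_word; infer_instance

-- ===== CLAIM (what is proved, stated in full; the proofs are below) =====
def Claim_equal_make_corrupt_word : Prop := ∀ (word : String), Dom_make_corrupt_word word → Spec_make_corrupt_word word (make_corrupt_word word)

-- ===== LEMMAS AND PROOFS =====
theorem pvWriteOdd_key (cs : List Char) : ∀ (s : Int) (acc : List Char), s % 2 = 0 →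
    (PySem.List.enumerate cs s).foldl
      (fun acc p => acc ++ [if p.1 % 2 == 1 then '#' else p.2]) acc
      = acc ++ pvWriteOdd cs := by
  induction cs using pvWriteOdd.induct with
  | case1 a b rest ih =>
    intro s acc hs
    have h1 : (s % 2 == 1) = false := by simp; omega
    have h2 : ((s + 1) % 2 == 1) = true := by simp; omega
    simp only [PySem.List.enumerate_cons, List.foldl_cons, h1, h2, if_true, if_false,
      Bool.false_eq_true]
    rw [ih (s + 1 + 1) _ (by omega)]
    simp [pvWriteOdd]
  | case2 xs hxs =>
    rcases xs with _ | ⟨a, _ | ⟨b, rest⟩⟩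
    · intro s acc _; simp [PySem.List.enumerate_nil, pvWriteOdd]
    · intro s acc hs
      have h1 : (s % 2 == 1) = false := by simp; omega
      simp only [PySem.List.enumerate_cons, PySem.List.enumerate_nil, List.foldl_cons,
        List.foldl_nil, h1, Bool.false_eq_true, if_false]
      simp [pvWriteOdd]
    · exact absurd (hxs a b rest rfl) (fun h => h)

-- ===== VERDICT (by name: the statement is the Claim_ definition above) =====
theorem make_corrupt_word_spec : Claim_equal_make_corrupt_word := by
  intro word _
  unfold Spec_make_corrupt_word make_corrupt_word make_corrupt_word_alt
  rw [pvWriteOdd_key word.toList 0 [] rfl]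
  simp
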